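-- pv_equiv track=rewrite | github.com/CharlesterWide/CursoSinNombre | entregaEjerciciosPython/IreneBaisco/funciones.py | Piramide
-- ===== SOURCE A (Python) =====
-- def Piramide(numer):
--     caden = ""
--     for fila in range(1,numer + 1):
--         for esp in range(1,(numer - fila) + 1):
--            caden = caden + " "
--
--         for dec in range(fila, 0,-1):
--            caden = caden + str(dec)
--
--         for inc in range(2, fila+1 ,1):
--            caden = caden + str(inc)
--
--         caden = caden + "\n"
--     return caden
-- ===== SOURCE B (Python) =====
-- def Piramide(numer):
--     rows = []
--     for fila in range(1, numer + 1):
--         part = "".join(str(abs(k) + 1) for k in range(-(fila - 1), fila))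
--         rows.append(" " * (numer - fila) + part + "\n")
--     return "".join(rows)
-- ===== Notes on version B (the rewrite author's own statement) =====
-- stated objective: simpler
-- what changed: Replaces the three separate inner append loops (spaces, descending digits, ascending digits) by a per-row expression: a repeated-space string plus one symmetric range mapped through abs(k)+1, with rows collected in a list and joined once.
import Mathlib
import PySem

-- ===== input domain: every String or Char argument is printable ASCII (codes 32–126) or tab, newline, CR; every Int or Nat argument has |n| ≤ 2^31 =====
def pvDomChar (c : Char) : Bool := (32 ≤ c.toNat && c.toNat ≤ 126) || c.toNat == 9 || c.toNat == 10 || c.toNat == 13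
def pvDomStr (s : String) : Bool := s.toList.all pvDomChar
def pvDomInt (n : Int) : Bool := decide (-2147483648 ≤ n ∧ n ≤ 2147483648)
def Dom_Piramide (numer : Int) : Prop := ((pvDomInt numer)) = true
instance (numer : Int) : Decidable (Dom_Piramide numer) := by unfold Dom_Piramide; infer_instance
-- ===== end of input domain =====

-- B builds each row as spaces plus a single symmetric |k|+1 range and joins the rows,
-- replacing A's three inner append loops (objective: simpler).


-- ===== PORT A =====
def Piramide (numer : Int) : String :=
  (PySem.List.pyRange 1 (numer + 1) 1).foldl (fun caden fila =>
    let caden := (PySem.List.pyRange 1 ((numer - fila) + 1) 1).foldl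
      (fun c _ => c ++ " ") caden
    let caden := (PySem.List.pyRange fila 0 (-1)).foldl
      (fun c dec => c ++ PySem.Int.toStr dec) caden
    let caden := (PySem.List.pyRange 2 (fila + 1) 1).foldl
      (fun c inc => c ++ PySem.Int.toStr inc) caden
    caden ++ "\n") ""

-- ===== PORT B =====
-- " " * (numer - fila): Python repeats max(0, n) times; List.replicate with .toNat is exact.
def Piramide_alt (numer : Int) : String :=
  String.join ((PySem.List.pyRange 1 (numer + 1) 1).map (fun fila =>
    String.ofList (List.replicate (numer - fila).toNat ' ') ++
    String.join ((PySem.List.pyRange (-(fila - 1)) fila 1).map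
      (fun k => PySem.Int.toStr (|k| + 1))) ++ "\n"))

-- ===== PRECONDITION & SPEC =====
def Spec_Piramide (numer : Int) (out : String) : Prop := out = Piramide_alt numer
instance (numer : Int) (out : String) : Decidable (Spec_Piramide numer out) := by unfold Spec_Piramide; infer_instance

-- ===== CLAIM (what is proved, stated in full; the proofs are below) =====
def Claim_equal_Piramide : Prop := ∀ (numer : Int), Dom_Piramide numer → Spec_Piramide numer (Piramide numer)

-- ===== LEMMAS AND PROOFS =====

theorem foldl_append_str (l : List String) (init : String) :
    l.foldl (fun r s => r ++ s) init = init ++ String.join l := by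
  induction l generalizing init with
  | nil => simp [String.join]
  | cons a t ih =>
    simp only [List.foldl, String.join]
    rw [ih ("" ++ a), ih (init ++ a)]
    simp [String.append_assoc]

theorem join_cons (s : String) (l : List String) :
    String.join (s :: l) = s ++ String.join l := by
  show List.foldl (fun r t => r ++ t) ("" ++ s) l = s ++ String.join l
  rw [foldl_append_str]; simp

theorem join_append (a b : List String) :
    String.join (a ++ b) = String.join a ++ String.join b := by
  induction a with
  | nil => simp [String.join]
  | cons x t ih => rw [List.cons_append, join_cons, join_cons, ih, String.append_assoc]

theorem foldl_append_join {α : Type} (l : List α) (g : α → String) (init : String) :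
    l.foldl (fun c x => c ++ g x) init = init ++ String.join (l.map g) := by
  induction l generalizing init with
  | nil => simp [String.join]
  | cons a t ih =>
    simp only [List.foldl, List.map_cons]
    rw [ih, join_cons, String.append_assoc]

theorem join_replicate_space (n : Nat) :
    String.join (List.replicate n " ") = String.ofList (List.replicate n ' ') := by
  induction n with
  | zero => rfl
  | succ m ih =>
    rw [List.replicate_succ, join_cons, ih, List.replicate_succ,
      show (' ' :: List.replicate m ' ') = [' '] ++ List.replicate m ' ' from rfl,
      String.ofList_append]

-- the symmetric range mapped through |k|+1 is the descending run followed by the ascending run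
theorem sym_range_eq (f : Int) (hf : 1 ≤ f) :
    (PySem.List.pyRange (-(f - 1)) f 1).map (fun k => |k| + 1) =
      PySem.List.pyRange f 0 (-1) ++ PySem.List.pyRange 2 (f + 1) 1 := by
  have hsplit : PySem.List.pyRange (-(f - 1)) f 1 =
      PySem.List.pyRange (-(f - 1)) 1 1 ++ PySem.List.pyRange 1 f 1 :=
    PySem.List.pyRange_one_append _ 1 _ (by omega) (by omega)
  rw [hsplit, List.map_append]
  congr 1
  · rw [PySem.List.pyRange_one, PySem.List.pyRange_neg_one, List.map_map]
    have h1 : (1 - -(f - 1)).toNat = (f - 0).toNat := by omega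
    rw [h1]
    apply List.map_congr_left
    intro j hj
    simp only [List.mem_range] at hj
    have hj' : (j : Int) < f := by omega
    simp only [Function.comp]
    rw [abs_of_nonpos (by omega : -(f - 1) + (j : Int) ≤ 0)]
    omega
  · rw [PySem.List.pyRange_one, PySem.List.pyRange_one, List.map_map]
    have hlen : (f - 1).toNat = (f + 1 - 2).toNat := by omega
    rw [← hlen]
    apply List.map_congr_left
    intro j _
    simp only [Function.comp]
    rw [abs_of_nonneg (by omega : (0:Int) ≤ 1 + (j : Int))]
    omega

-- one row of A, written as appending B's row to the accumulator
theorem row_eq (numer fila : Int) (hf : 1 ≤ fila) (c : String) :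
    ((PySem.List.pyRange 2 (fila + 1) 1).foldl (fun c inc => c ++ PySem.Int.toStr inc)
      ((PySem.List.pyRange fila 0 (-1)).foldl (fun c dec => c ++ PySem.Int.toStr dec)
        ((PySem.List.pyRange 1 ((numer - fila) + 1) 1).foldl (fun c _ => c ++ " ") c))) ++ "\n"
    = c ++ (String.ofList (List.replicate (numer - fila).toNat ' ') ++
        String.join ((PySem.List.pyRange (-(fila - 1)) fila 1).map
          (fun k => PySem.Int.toStr (|k| + 1))) ++ "\n") := by
  rw [foldl_append_join, foldl_append_join, foldl_append_join]
  have hsym : (PySem.List.pyRange (-(fila - 1)) fila 1).map (fun k => PySem.Int.toStr (|k| + 1))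
      = (PySem.List.pyRange fila 0 (-1) ++ PySem.List.pyRange 2 (fila + 1) 1).map
          PySem.Int.toStr := by
    rw [← sym_range_eq fila hf, List.map_map]
    simp [Function.comp]
  rw [hsym, List.map_append, join_append]
  have hmap : (PySem.List.pyRange 1 ((numer - fila) + 1) 1).map (fun _ => (" " : String))
      = List.replicate (numer - fila).toNat " " := by
    rw [List.eq_replicate_iff]
    refine ⟨?_, ?_⟩
    · rw [List.length_map, PySem.List.length_pyRange_one]; omega
    · intro b hb
      simp only [List.mem_map] at hb
      obtain ⟨x, _, hx⟩ := hb
      exact hx.symm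
  rw [hmap, join_replicate_space]
  simp [String.append_assoc]

theorem piramide_foldl_eq (numer : Int) (l : List Int) (hl : ∀ x ∈ l, 1 ≤ x) (init : String) :
    l.foldl (fun caden fila =>
      ((PySem.List.pyRange 2 (fila + 1) 1).foldl (fun c inc => c ++ PySem.Int.toStr inc)
        ((PySem.List.pyRange fila 0 (-1)).foldl (fun c dec => c ++ PySem.Int.toStr dec)
          ((PySem.List.pyRange 1 ((numer - fila) + 1) 1).foldl (fun c _ => c ++ " ") caden))) ++ "\n")
      init
    = init ++ String.join (l.map (fun fila =>
        String.ofList (List.replicate (numer - fila).toNat ' ') ++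
        String.join ((PySem.List.pyRange (-(fila - 1)) fila 1).map
          (fun k => PySem.Int.toStr (|k| + 1))) ++ "\n")) := by
  induction l generalizing init with
  | nil => simp [String.join]
  | cons a t ih =>
    simp only [List.foldl, List.map_cons]
    rw [row_eq numer a (hl a List.mem_cons_self) init,
      ih (fun x hx => hl x (List.mem_cons_of_mem a hx)), join_cons, String.append_assoc]

-- ===== VERDICT (by name: the statement is the Claim_ definition above) =====
theorem Piramide_spec : Claim_equal_Piramide := by
  intro numer _
  unfold Spec_Piramide Piramide Piramide_alt
  rw [piramide_foldl_eq numer _ (fun x hx => ((PySem.List.mem_pyRange_one).1 hx).1) ""]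
  simp
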